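-- pv_equiv track=rewrite | github.com/siihwanpark/BatchSpec | tests/simulate_ngram_drafter.py | draft_lookup_lastmatch
-- ===== SOURCE A (Python) =====
-- from typing import List, Dict, Any
--
-- def draft_lookup_lastmatch(
--     ctx: List[int],
--     draft_length: int,
--     max_ngram_size: int,
-- ) -> List[int]:
--     """
--     ctx: prompt + generated tokens (no padding)
--     return: draft_length length of candidate tokens (empty list if none)
--     rules:
--       - find suffix n-gram (n=max..1)
--       - select the "most recent" (last) occurrence of suffix in prefix
--       - exclude self-match (suffix itself in the last window)
--       - and the position after the selected position must have draft_length tokens actually exist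
--     """
--     L = len(ctx)
--     K = draft_length
--     for n in range(min(max_ngram_size, L), 0, -1):
--         if L < n + K:
--             continue  # suffix is possible, but cannot draw K continuation tokens
--
--         suffix = ctx[L - n : L]  # last n tokens
--
--         # "exclude self-match" to allow window start i from 0..(L-n-1)
--         last_i = -1
--         for i in range(0, L - n):
--             if ctx[i : i + n] == suffix:
--                 # continuation must exist: i+n+K <= L
--                 if i + n + K <= L:
--                     last_i = i
--
--         if last_i >= 0:
--             start = last_i + n
--             return ctx[start : start + K]
--
--     return []
-- ===== SOURCE B (Python) =====
-- def draft_lookup_lastmatch(ctx, draft_length, max_ngram_size):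
--     L = len(ctx)
--     K = draft_length
--     # m[p] = length of longest common suffix of ctx[:p] and ctx, for p in 0..L-1
--     m = [0] * L
--     for p in range(L):
--         k = 0
--         while k < p and ctx[p - 1 - k] == ctx[L - 1 - k]:
--             k += 1
--         m[p] = k
--     hi = min(L - 1, L - K)
--     for n in range(min(max_ngram_size, L), 0, -1):
--         if L < n + K:
--             continue
--         for p in range(hi, n - 1, -1):
--             if m[p] >= n:
--                 return ctx[p : p + K]
--     return []
-- ===== Notes on version B (the rewrite author's own statement) =====
-- stated objective: faster
-- what changed: B precomputes one longest-common-suffix table m[p] (length of the common suffix of ctx[:p] and ctx) and then, for each n descending, returns at the first hit of a single descending table scan, replacing A's per-n forward rescan that slices and compares every n-gram window and keeps the last match.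
import Mathlib
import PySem

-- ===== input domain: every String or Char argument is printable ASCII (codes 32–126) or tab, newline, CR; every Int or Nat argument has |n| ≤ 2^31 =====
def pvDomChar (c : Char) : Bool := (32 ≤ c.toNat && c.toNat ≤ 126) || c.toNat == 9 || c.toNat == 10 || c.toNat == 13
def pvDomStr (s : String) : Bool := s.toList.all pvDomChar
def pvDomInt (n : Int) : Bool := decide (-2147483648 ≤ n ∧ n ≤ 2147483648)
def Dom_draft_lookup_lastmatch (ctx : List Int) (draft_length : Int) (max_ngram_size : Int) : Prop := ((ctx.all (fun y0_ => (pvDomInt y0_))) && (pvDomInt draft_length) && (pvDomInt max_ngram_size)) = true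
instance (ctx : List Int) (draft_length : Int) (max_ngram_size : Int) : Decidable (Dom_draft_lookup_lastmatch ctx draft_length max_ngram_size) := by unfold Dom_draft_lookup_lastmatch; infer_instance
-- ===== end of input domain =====

-- B replaces A's per-n rescan of all n-gram windows by one precomputed
-- longest-common-suffix table consulted by a descending first-match scan (objective: faster; measured).

-- ===== PORT A =====
-- inner loop: last i in [0, L-n) whose window matches the suffix and leaves K continuation tokens
def pvA_inner (ctx suffix : List Int) (n K L : Int) : Int :=
  (PySem.List.pyRange 0 (L - n) 1).foldl
    (fun last_i i =>
      if PySem.List.slice ctx (some i) (some (i + n)) = suffix then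
        if i + n + K ≤ L then i else last_i
      else last_i) (-1)

def pvA_loop (ctx : List Int) (K L : Int) : List Int → List Int
  | [] => []
  | n :: ns =>
    if L < n + K then pvA_loop ctx K L ns
    else
      let suffix := PySem.List.slice ctx (some (L - n)) (some L)
      let last_i := pvA_inner ctx suffix n K L
      if 0 ≤ last_i then PySem.List.slice ctx (some (last_i + n)) (some (last_i + n + K))
      else pvA_loop ctx K L ns

def draft_lookup_lastmatch (ctx : List Int) (draft_length : Int) (max_ngram_size : Int) : List Int :=
  let L : Int := ctx.length
  pvA_loop ctx draft_length L (PySem.List.pyRange (min max_ngram_size L) 0 (-1))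

-- ===== PORT B =====
-- the `while k < p and ctx[p-1-k] == ctx[L-1-k]: k += 1` loop of Source B
def pvB_while (ctx : List Int) (L p k : Int) : Int :=
  if h : k < p ∧ PySem.List.pyGetD ctx (p - 1 - k) 0 = PySem.List.pyGetD ctx (L - 1 - k) 0 then
    pvB_while ctx L p (k + 1)
  else k
termination_by (p - k).toNat
decreasing_by omega

-- `for p in range(hi, n-1, -1): if m[p] >= n: return ctx[p:p+K]`
def pvB_inner (ctx m : List Int) (K n : Int) : List Int → Option (List Int)
  | [] => none
  | p :: ps =>
    if n ≤ PySem.List.pyGetD m p 0 then some (PySem.List.slice ctx (some p) (some (p + K)))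
    else pvB_inner ctx m K n ps

def pvB_loop (ctx m : List Int) (K L hi : Int) : List Int → List Int
  | [] => []
  | n :: ns =>
    if L < n + K then pvB_loop ctx m K L hi ns
    else
      match pvB_inner ctx m K n (PySem.List.pyRange hi (n - 1) (-1)) with
      | some r => r
      | none => pvB_loop ctx m K L hi ns

def draft_lookup_lastmatch_alt (ctx : List Int) (draft_length : Int) (max_ngram_size : Int) : List Int :=
  let L : Int := ctx.length
  let K := draft_length
  let m := (PySem.List.pyRange 0 L 1).map (fun p => pvB_while ctx L p 0)
  let hi := min (L - 1) (L - K)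
  pvB_loop ctx m K L hi (PySem.List.pyRange (min max_ngram_size L) 0 (-1))

-- ===== PRECONDITION & SPEC =====
def Spec_draft_lookup_lastmatch (ctx : List Int) (draft_length : Int) (max_ngram_size : Int) (out : List Int) : Prop := out = draft_lookup_lastmatch_alt ctx draft_length max_ngram_size
instance (ctx : List Int) (draft_length : Int) (max_ngram_size : Int) (out : List Int) : Decidable (Spec_draft_lookup_lastmatch ctx draft_length max_ngram_size out) := by unfold Spec_draft_lookup_lastmatch; infer_instance

-- ===== CLAIM (what is proved, stated in full; the proofs are below) =====
def Claim_equal_draft_lookup_lastmatch : Prop := ∀ (ctx : List Int) (draft_length : Int) (max_ngram_size : Int), Dom_draft_lookup_lastmatch ctx draft_length max_ngram_size → Spec_draft_lookup_lastmatch ctx draft_length max_ngram_size (draft_lookup_lastmatch ctx draft_length max_ngram_size)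

-- ===== LEMMAS AND PROOFS =====

-- basic facts about the while loop of B
theorem pvB_while_ge (ctx : List Int) (L p k : Int) : k ≤ pvB_while ctx L p k := by
  fun_induction pvB_while with
  | case1 k h ih => omega
  | case2 k h => omega

theorem pvB_while_matches (ctx : List Int) (L p k : Int) : ∀ t : Int, k ≤ t →
    t < pvB_while ctx L p k →
    PySem.List.pyGetD ctx (p - 1 - t) 0 = PySem.List.pyGetD ctx (L - 1 - t) 0 := by
  fun_induction pvB_while with
  | case1 k h2 ih =>
      intro t ht1 ht2
      rcases eq_or_lt_of_le ht1 with rfl | hlt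
      · exact h2.2
      · exact ih t (by omega) ht2
  | case2 k h2 => intro t ht1 ht2; omega

theorem pvB_while_stop (ctx : List Int) (L p k : Int) (h : pvB_while ctx L p k < p) :
    ¬ PySem.List.pyGetD ctx (p - 1 - (pvB_while ctx L p k)) 0
       = PySem.List.pyGetD ctx (L - 1 - (pvB_while ctx L p k)) 0 := by
  fun_induction pvB_while with
  | case1 k h2 ih => exact ih h
  | case2 k h2 => intro he; exact h2 ⟨h, he⟩

-- n ≤ while-result iff the last n positions before p all match the suffix positions
theorem pvB_while_iff (ctx : List Int) (L p n : Int) (_hp : 0 ≤ p) (hn : n ≤ p) :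
    n ≤ pvB_while ctx L p 0 ↔
      ∀ t : Int, 0 ≤ t → t < n →
        PySem.List.pyGetD ctx (p - 1 - t) 0 = PySem.List.pyGetD ctx (L - 1 - t) 0 := by
  constructor
  · intro h t ht1 ht2
    exact pvB_while_matches ctx L p 0 t ht1 (by omega)
  · intro h
    by_contra hc
    push Not at hc
    have h1 := pvB_while_ge ctx L p 0
    have h2 : pvB_while ctx L p 0 < p := by omega
    exact pvB_while_stop ctx L p 0 h2 (h _ h1 (by omega))

-- slice equality characterised pointwise
theorem pvNatChar (ctx : List Int) (N P : Nat) (_hN : 1 ≤ N) (_h1 : N ≤ P) (_h2 : P ≤ ctx.length) :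
    ((ctx.drop (P - N)).take N = (ctx.drop (ctx.length - N)).take N) ↔
      ∀ j, j < N → ctx[P - N + j]? = ctx[ctx.length - N + j]? := by
  rw [List.ext_getElem?_iff]
  constructor
  · intro h j hj
    have := h j
    rwa [List.getElem?_take_of_lt hj, List.getElem?_take_of_lt hj,
      List.getElem?_drop, List.getElem?_drop] at this
  · intro h i
    by_cases hi : i < N
    · rw [List.getElem?_take_of_lt hi, List.getElem?_take_of_lt hi,
        List.getElem?_drop, List.getElem?_drop]; exact h i hi
    · have e1 : ((ctx.drop (P - N)).take N)[i]? = none := by simp; omega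
      have e2 : ((ctx.drop (ctx.length - N)).take N)[i]? = none := by simp; omega
      rw [e1, e2]

theorem pvSliceChar (ctx : List Int) (n p : Int) (hn : 1 ≤ n) (hp : n ≤ p)
    (hpL : p ≤ (ctx.length : Int)) :
    (PySem.List.slice ctx (some (p - n)) (some p)
       = PySem.List.slice ctx (some ((ctx.length : Int) - n)) (some (ctx.length : Int))) ↔
      (∀ t : Int, 0 ≤ t → t < n →
        PySem.List.pyGetD ctx (p - 1 - t) 0 = PySem.List.pyGetD ctx ((ctx.length : Int) - 1 - t) 0) := by
  rw [PySem.List.slice_toNat ctx (by omega) (by omega),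
      PySem.List.slice_toNat ctx (by omega) (by omega)]
  have e1 : p.toNat - (p - n).toNat = n.toNat := by omega
  have e2 : ((ctx.length : Int)).toNat - ((ctx.length : Int) - n).toNat = n.toNat := by omega
  have e3 : (p - n).toNat = p.toNat - n.toNat := by omega
  have e4 : ((ctx.length : Int) - n).toNat = ctx.length - n.toNat := by omega
  rw [e1, e2, e3, e4]
  rw [pvNatChar ctx n.toNat p.toNat (by omega) (by omega) (by omega)]
  constructor
  · intro h t ht0 htn
    have hj := h (n.toNat - 1 - t.toNat) (by omega)
    rw [PySem.List.pyGetD_eq_getElem ctx (i := p - 1 - t) 0 (by omega) (by omega),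
        PySem.List.pyGetD_eq_getElem ctx (i := (ctx.length : Int) - 1 - t) 0 (by omega) (by omega)]
    have i1 : (p - 1 - t).toNat = p.toNat - n.toNat + (n.toNat - 1 - t.toNat) := by omega
    have i2 : ((ctx.length : Int) - 1 - t).toNat = ctx.length - n.toNat + (n.toNat - 1 - t.toNat) := by omega
    apply Option.some.inj
    rw [← List.getElem?_eq_getElem (by omega), ← List.getElem?_eq_getElem (by omega)]
    rw [i1, i2]
    exact hj
  · intro h j hj
    have ht := h ((n.toNat : Int) - 1 - j) (by omega) (by omega)
    rw [PySem.List.pyGetD_eq_getElem ctx (i := p - 1 - ((n.toNat : Int) - 1 - j)) 0 (by omega) (by omega),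
        PySem.List.pyGetD_eq_getElem ctx (i := (ctx.length : Int) - 1 - ((n.toNat : Int) - 1 - j)) 0 (by omega) (by omega)] at ht
    have i1 : (p - 1 - ((n.toNat : Int) - 1 - j)).toNat = p.toNat - n.toNat + j := by omega
    have i2 : ((ctx.length : Int) - 1 - ((n.toNat : Int) - 1 - j)).toNat = ctx.length - n.toNat + j := by omega
    have ht' : ctx[(p - 1 - ((n.toNat : Int) - 1 - j)).toNat]? = ctx[((ctx.length : Int) - 1 - ((n.toNat : Int) - 1 - j)).toNat]? := by
      rw [List.getElem?_eq_getElem (by omega), List.getElem?_eq_getElem (by omega), ht]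
    rw [i1, i2] at ht'
    exact ht'

-- a keep-last foldl is find? on the reversed list
theorem pvFoldlLast (P R : Int → Prop) [DecidablePred P] [DecidablePred R]
    (l : List Int) (init : Int) :
    l.foldl (fun acc i => if P i then if R i then i else acc else acc) init
      = (l.reverse.find? (fun i => decide (P i) && decide (R i))).getD init := by
  induction l generalizing init with
  | nil => simp
  | cons a l ih =>
    simp only [List.foldl_cons, List.reverse_cons, List.find?_append, ih]
    cases hf : l.reverse.find? (fun i => decide (P i) && decide (R i)) with
    | some x => simp
    | none =>
      simp only [Option.none_or, List.find?_cons, List.find?_nil]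
      by_cases hP : P a <;> by_cases hR : R a <;> simp [hP, hR]

-- B's inner loop is a find? followed by a slice
theorem pvB_inner_eq_find (ctx m : List Int) (K n : Int) (ps : List Int) :
    pvB_inner ctx m K n ps
      = (ps.find? (fun p => decide (n ≤ PySem.List.pyGetD m p 0))).map
          (fun p => PySem.List.slice ctx (some p) (some (p + K))) := by
  induction ps with
  | nil => simp [pvB_inner]
  | cons p ps ih =>
    simp only [pvB_inner, List.find?_cons]
    by_cases h : n ≤ PySem.List.pyGetD m p 0 <;> simp [h, ih]

-- find? on a reversed range is invariant under shifting the range and the predicate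
theorem pvFindShift (QA QB : Int → Bool) (n : Int) :
    ∀ (a b : Int), (∀ i, a ≤ i → i < b → QA i = QB (i + n)) →
    ((PySem.List.pyRange a b 1).reverse.find? QA).map (· + n)
      = (PySem.List.pyRange (a + n) (b + n) 1).reverse.find? QB := by
  intro a b
  by_cases hab : b ≤ a
  · intro _
    rw [PySem.List.pyRange_one_eq_nil hab, PySem.List.pyRange_one_eq_nil (by omega)]
    simp
  · have hd : 0 < (b - a).toNat := by omega
    intro hpt
    have hb : b = (b - 1) + 1 := by omega
    rw [hb, PySem.List.pyRange_one_succ_right (by omega),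
        show (b - 1) + 1 + n = ((b - 1) + n) + 1 by ring,
        PySem.List.pyRange_one_succ_right (by omega)]
    simp only [List.reverse_append, List.reverse_cons, List.reverse_nil, List.nil_append,
      List.cons_append, List.find?_cons]
    rw [hpt (b - 1) (by omega) (by omega)]
    cases hq : QB (b - 1 + n) with
    | true => simp
    | false =>
      exact pvFindShift QA QB n a (b - 1) (fun i h1 h2 => hpt i h1 (by omega))
termination_by a b => (b - a).toNat
decreasing_by omega

-- truncating a range whose tail never satisfies the predicate
theorem pvFindTrunc (Q : Int → Bool) (a m b : Int) (h1 : a ≤ m) (h2 : m ≤ b)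
    (h : ∀ x, m ≤ x → x < b → Q x = false) :
    (PySem.List.pyRange a b 1).reverse.find? Q = (PySem.List.pyRange a m 1).reverse.find? Q := by
  rw [PySem.List.pyRange_one_append a m b h1 h2]
  rw [List.reverse_append, List.find?_append]
  have : (PySem.List.pyRange m b 1).reverse.find? Q = none := by
    rw [List.find?_eq_none]
    intro x hx
    rw [List.mem_reverse, PySem.List.mem_pyRange_one] at hx
    simp [h x hx.1 hx.2]
  simp [this]

-- the per-n inner searches agree (as a shifted find?)
theorem pvInnerEq (ctx : List Int) (K n : Int) (hn : 1 ≤ n) (hnL : n ≤ (ctx.length : Int))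
    (hK : n + K ≤ (ctx.length : Int)) :
    pvB_inner ctx ((PySem.List.pyRange 0 (ctx.length : Int) 1).map (fun p => pvB_while ctx (ctx.length : Int) p 0)) K n
        (PySem.List.pyRange (min ((ctx.length : Int) - 1) ((ctx.length : Int) - K)) (n - 1) (-1))
      = (((PySem.List.pyRange 0 ((ctx.length : Int) - n) 1).reverse.find?
            (fun i => decide (PySem.List.slice ctx (some i) (some (i + n))
                = PySem.List.slice ctx (some ((ctx.length : Int) - n)) (some (ctx.length : Int)))
              && decide (i + n + K ≤ (ctx.length : Int)))).map
          (fun i => PySem.List.slice ctx (some (i + n)) (some (i + n + K)))) := by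
  have hL : (0:Int) ≤ (ctx.length : Int) := Int.natCast_nonneg _
  set L : Int := (ctx.length : Int) with hLdef
  set hi : Int := min (L - 1) (L - K) with hidef
  have hhi1 : hi ≤ L - 1 := by omega
  have hhi2 : hi ≤ L - K := by omega
  have hhin : n - 1 ≤ hi := by omega
  rw [pvB_inner_eq_find,
      show (n - 1 : Int) = (n - 1) by rfl,
      PySem.List.pyRange_neg_one_eq_reverse,
      show (n - 1 + 1 : Int) = n by ring]
  rw [pvFindTrunc _ 0 (hi + 1 - n) (L - n) (by omega) (by omega) (by
    intro x hx1 hx2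
    simp only [Bool.and_eq_false_iff, decide_eq_false_iff_not]
    right
    omega)]
  have hshift := pvFindShift
      (fun i => decide (PySem.List.slice ctx (some i) (some (i + n))
          = PySem.List.slice ctx (some (L - n)) (some L)) && decide (i + n + K ≤ L))
      (fun p => decide (n ≤ PySem.List.pyGetD
          ((PySem.List.pyRange 0 L 1).map (fun p => pvB_while ctx L p 0)) p 0))
      n 0 (hi + 1 - n) (by
    intro i hi0 hiu
    have hb : (decide (i + n + K ≤ L)) = true := by simp; omega
    have hget : PySem.List.pyGetD
        ((PySem.List.pyRange 0 L 1).map (fun p => pvB_while ctx L p 0)) (i + n) 0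
        = pvB_while ctx L (i + n) 0 := by
      exact PySem.List.pyGetD_map_pyRange_of_nonneg _ L (i + n) 0 (by omega) (by omega)
    simp only [hget]
    have hiff : (PySem.List.slice ctx (some i) (some (i + n))
        = PySem.List.slice ctx (some (L - n)) (some L)) ↔ n ≤ pvB_while ctx L (i + n) 0 := by
      rw [pvB_while_iff ctx L (i + n) n (by omega) (by omega)]
      have := pvSliceChar ctx n (i + n) hn (by omega) (by omega)
      rw [show (i + n - n : Int) = i by ring] at this
      exact this
    rw [hb, Bool.and_true]
    exact decide_eq_decide.2 hiff)
  rw [show (0 + n : Int) = n by ring, show (hi + 1 - n + n : Int) = hi + 1 by ring] at hshift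
  rw [← hshift]
  rw [Option.map_map]
  congr 1

theorem pvLoopEq (ctx : List Int) (K : Int) (ns : List Int)
    (hns : ∀ n ∈ ns, 1 ≤ n ∧ n ≤ (ctx.length : Int)) :
    pvA_loop ctx K (ctx.length : Int) ns
      = pvB_loop ctx ((PySem.List.pyRange 0 (ctx.length : Int) 1).map (fun p => pvB_while ctx (ctx.length : Int) p 0))
          K (ctx.length : Int) (min ((ctx.length : Int) - 1) ((ctx.length : Int) - K)) ns := by
  induction ns with
  | nil => simp [pvA_loop, pvB_loop]
  | cons n ns ih =>
    obtain ⟨hn1, hn2⟩ := hns n List.mem_cons_self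
    have ih' := ih (fun n hn => hns n (List.mem_cons_of_mem _ hn))
    by_cases hc : (ctx.length : Int) < n + K
    · simp only [pvA_loop, pvB_loop, if_pos hc]; exact ih'
    · simp only [pvA_loop, pvB_loop, if_neg hc]
      rw [pvInnerEq ctx K n hn1 hn2 (by omega)]
      unfold pvA_inner
      rw [pvFoldlLast
        (fun i => PySem.List.slice ctx (some i) (some (i + n))
          = PySem.List.slice ctx (some ((ctx.length : Int) - n)) (some (ctx.length : Int)))
        (fun i => i + n + K ≤ (ctx.length : Int))]
      cases hf : (PySem.List.pyRange 0 ((ctx.length : Int) - n) 1).reverse.find?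
          (fun i => decide (PySem.List.slice ctx (some i) (some (i + n))
              = PySem.List.slice ctx (some ((ctx.length : Int) - n)) (some (ctx.length : Int)))
            && decide (i + n + K ≤ (ctx.length : Int))) with
      | none => simpa [hf] using ih'
      | some x =>
        have hx : 0 ≤ x := by
          have hmem := List.mem_of_find?_eq_some hf
          rw [List.mem_reverse, PySem.List.mem_pyRange_one] at hmem
          omega
        simp [hx]

-- ===== VERDICT (by name: the statement is the Claim_ definition above) =====
theorem draft_lookup_lastmatch_spec : Claim_equal_draft_lookup_lastmatch := by
  intro ctx K maxn _
  unfold Spec_draft_lookup_lastmatch draft_lookup_lastmatch draft_lookup_lastmatch_alt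
  exact pvLoopEq ctx K _ (by
    intro n hn
    have := (PySem.List.mem_pyRange_neg_one).1 hn
    omega)
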